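-- pv_equiv track=rewrite | github.com/messias077/teste | src/utils/geradores.py | gerar_head
-- ===== SOURCE A (Python) =====
-- def gerar_head(paginas_dump_arq, qtd_tokens):
--     """
--     Gera um head com as primeiras paginas que contém os 'qtd_tokens' tokens (ex.: palavras, sinais de
--     pontuação, artigos, simbolos em geral pertencentes ao texto) iniciais do arquivo
--         :param paginas_dump_arq: Lista contendo todas as páginas do arquivo
--         :param qtd_tokens: Quantidade de tokens que serão consideradas para a geração do head
--         :return: Lista com as páginas que contém os primeiros 'qtd_tokens' tokens do arquivo
--     """
--     qtd_tokens_lidos = 0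
--     head = []
--
--     for p in paginas_dump_arq:
--         head.append(p)
--         tokens = p.split()
--         qtd_tokens_lidos += len(tokens)
--
--         if qtd_tokens_lidos >= qtd_tokens:
--             break
--
--     return head
-- ===== SOURCE B (Python) =====
-- def gerar_head(paginas_dump_arq, qtd_tokens):
--     # Compute running cumulative token totals first, then slice up to the
--     # first page where the total reaches the threshold (whole list if never).
--     cums = []
--     total = 0
--     for p in paginas_dump_arq:
--         total += len(p.split())
--         cums.append(total)
--     cut = next((i + 1 for i, t in enumerate(cums) if t >= qtd_tokens),
--                len(paginas_dump_arq))
--     return paginas_dump_arq[:cut]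
-- ===== Notes on version B (the rewrite author's own statement) =====
-- stated objective: alternative
-- what changed: B first builds the list of cumulative per-page token totals, then finds the first index reaching the threshold and returns a slice of the page list, instead of A's single loop that appends pages and breaks.
import Mathlib
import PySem

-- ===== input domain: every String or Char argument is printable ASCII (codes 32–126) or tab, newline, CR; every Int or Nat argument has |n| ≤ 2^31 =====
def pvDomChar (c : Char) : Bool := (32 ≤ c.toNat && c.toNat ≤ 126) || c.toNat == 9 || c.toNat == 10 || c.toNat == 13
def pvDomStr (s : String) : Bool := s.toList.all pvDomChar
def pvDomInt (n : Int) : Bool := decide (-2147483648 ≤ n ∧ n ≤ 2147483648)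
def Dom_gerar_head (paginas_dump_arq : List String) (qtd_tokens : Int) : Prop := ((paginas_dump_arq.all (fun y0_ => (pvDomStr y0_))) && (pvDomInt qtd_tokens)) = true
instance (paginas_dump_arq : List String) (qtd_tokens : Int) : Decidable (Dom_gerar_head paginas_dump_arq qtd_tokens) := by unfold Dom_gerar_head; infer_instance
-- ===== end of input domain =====

-- B builds the cumulative per-page token totals, finds the first index reaching the
-- threshold and slices the page list there; A loops appending pages and breaking.


-- ===== PORT A =====
-- A's loop: append the page, add its token count, break when the count reaches qtd_tokens.
def gerarHeadGo (qtd_tokens : Int) : List String → Int → List String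
  | [], _ => []
  | p :: rest, qtd_tokens_lidos =>
    let qtd' := qtd_tokens_lidos + ((PySem.Str.split₀ p).length : Int)
    if qtd' ≥ qtd_tokens then [p] else p :: gerarHeadGo qtd_tokens rest qtd'

def gerar_head (paginas_dump_arq : List String) (qtd_tokens : Int) : List String :=
  gerarHeadGo qtd_tokens paginas_dump_arq 0

-- ===== PORT B =====
-- running cumulative token totals (Source B's first loop)
def pvCums : List String → Int → List Int
  | [], _ => []
  | p :: rest, total =>
    let total' := total + ((PySem.Str.split₀ p).length : Int)
    total' :: pvCums rest total'

-- first i+1 with cums[i] ≥ qtd_tokens, else the default (Source B's next(...) over enumerate)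
def pvCut (qtd_tokens : Int) : List Int → Nat → Nat → Nat
  | [], _, dflt => dflt
  | t :: ts, i, dflt => if t ≥ qtd_tokens then i + 1 else pvCut qtd_tokens ts (i + 1) dflt

def gerar_head_alt (paginas_dump_arq : List String) (qtd_tokens : Int) : List String :=
  let cums := pvCums paginas_dump_arq 0
  let cut := pvCut qtd_tokens cums 0 paginas_dump_arq.length
  PySem.List.slice paginas_dump_arq none (some (cut : Int))

-- ===== PRECONDITION & SPEC =====
def Spec_gerar_head (paginas_dump_arq : List String) (qtd_tokens : Int) (out : List String) : Prop := out = gerar_head_alt paginas_dump_arq qtd_tokens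
instance (paginas_dump_arq : List String) (qtd_tokens : Int) (out : List String) : Decidable (Spec_gerar_head paginas_dump_arq qtd_tokens out) := by unfold Spec_gerar_head; infer_instance

-- ===== CLAIM (what is proved, stated in full; the proofs are below) =====
def Claim_equal_gerar_head : Prop := ∀ (paginas_dump_arq : List String) (qtd_tokens : Int), Dom_gerar_head paginas_dump_arq qtd_tokens → Spec_gerar_head paginas_dump_arq qtd_tokens (gerar_head paginas_dump_arq qtd_tokens)

-- ===== LEMMAS AND PROOFS =====
-- the cut index relative to the current suffix: first position (1-based) whose cum ≥ q, else length
def pvCutRel (q : Int) : List Int → Nat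
  | [] => 0
  | t :: ts => if t ≥ q then 1 else 1 + pvCutRel q ts

theorem pvCut_eq_cutRel (q : Int) (ts : List Int) : ∀ (i : Nat),
    pvCut q ts i (i + ts.length) = i + pvCutRel q ts := by
  induction ts with
  | nil => intro i; simp [pvCut, pvCutRel]
  | cons t ts ih =>
    intro i
    simp only [pvCut, pvCutRel, List.length_cons]
    split
    · rfl
    · have := ih (i + 1)
      have h2 : i + 1 + ts.length = i + (ts.length + 1) := by omega
      rw [h2] at this
      rw [this]; omega

theorem pvCums_length (xs : List String) (acc : Int) : (pvCums xs acc).length = xs.length := by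
  induction xs generalizing acc with
  | nil => simp [pvCums]
  | cons p rest ih => simp [pvCums, ih]

theorem gerarHeadGo_eq_take (q : Int) (xs : List String) : ∀ (acc : Int),
    gerarHeadGo q xs acc = xs.take (pvCutRel q (pvCums xs acc)) := by
  induction xs with
  | nil => intro acc; simp [gerarHeadGo, pvCums, pvCutRel]
  | cons p rest ih =>
    intro acc
    simp only [gerarHeadGo, pvCums, pvCutRel]
    split
    · simp
    · rw [ih]
      have : 1 + pvCutRel q (pvCums rest (acc + ((PySem.Str.split₀ p).length : Int))) = (pvCutRel q (pvCums rest (acc + ((PySem.Str.split₀ p).length : Int)))) + 1 := by omega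
      rw [this, List.take_succ_cons]

-- ===== VERDICT (by name: the statement is the Claim_ definition above) =====
theorem gerar_head_spec : Claim_equal_gerar_head := by
  intro xs q _
  show gerar_head xs q = gerar_head_alt xs q
  unfold gerar_head gerar_head_alt
  show gerarHeadGo q xs 0 = PySem.List.slice xs none (some ((pvCut q (pvCums xs 0) 0 xs.length : Nat) : Int))
  have hlen : (pvCums xs 0).length = xs.length := pvCums_length xs 0
  have hcut : pvCut q (pvCums xs 0) 0 xs.length = pvCutRel q (pvCums xs 0) := by
    have := pvCut_eq_cutRel q (pvCums xs 0) 0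
    simpa [hlen] using this
  rw [hcut, PySem.List.slice_to_natCast, gerarHeadGo_eq_take]
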